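-- pv_equiv track=rewrite | github.com/mStegall/advent21 | 22/2.py | cubeSegments
-- ===== SOURCE A (Python) =====
-- def lineSegments(r1,r2):
--     if r2[0] < r1[0]:
--         if r2[1] < r1[0]:
--             return [r1],[]
--         if r2[1] == r1[0] and r1[0] < r1[1]:
--                 return [(r1[0]+1, r1[1])],[(r1[0],r1[0])]
--
--     if r2[0] == r1[0] and r2[1] < r1[1]:
--             return [(r2[1]+1,r1[1])],[(r1[0],r2[1])]
--
--     if r2[0]==r1[1]:
--         if r1[0] == r1[1]:
--             return [], [r1]
--         else:
--             return [(r1[0],r1[1]-1)],[(r1[1],r1[1])]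
--
--     if r2[0]<=r1[0] and r1[1]<=r2[1]:
--         return [], [r1]
--     if r2[0]<=r1[0] and r1[0]<r2[1]<r1[1]:
--         return [(r2[1]+1,r1[1])], [(r1[0],r2[1])]
--
--     # Middle Case
--     if r1[0]<r2[0] and r2[1]<r1[1]:
--         return [(r1[0],r2[0]-1),(r2[1]+1,r1[1])], [r2]
--
--     # extends to the right
--     if r1[0]<r2[0]<r1[1] and r1[1] <= r2[1]:
--         return [(r1[0],r2[0]-1)], [(r2[0],r1[1])]
--
--     return [r1],[]
--
-- def squareSegments(s1,s2):
--     (x1,y1) = s1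
--     (x2,y2) = s2
--
--     livex,deadx = lineSegments(x1, x2)
--
--     if len(deadx) == 0:
--         return [s1],[]
--
--     livey,deady = lineSegments(y1, y2)
--
--     if len(deady) == 0:
--         return [s1],[]
--
--     liveSquares = []
--     deadSquares = []
--
--     for r in livex:
--         liveSquares.append((r,y1))
--
--     for r in deadx:
--         for r2 in livey:
--             liveSquares.append((r,r2))
--         for r2 in deady:
--             deadSquares.append((r,r2))
--
--     return liveSquares, deadSquares
--
-- def cubeSegments(c1,c2):
--     (x1,y1,z1) = c1
--     (x2,y2,z2) = c2
--
--     livez, deadz = lineSegments(z1, z2)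
--
--     if len(deadz) > 0:
--         liveSquares, deadSquares = squareSegments((x1,y1), (x2,y2))
--     else:
--         return [c1],[]
--
--     liveCubes = []
--     deadCubes = []
--
--     for r in livez:
--         liveCubes.append((x1,y1,r))
--
--     for r in deadz:
--         for (x,y) in liveSquares:
--             liveCubes.append((x,y,r))
--         for (x,y) in deadSquares:
--             deadCubes.append((x,y,r))
--
--     return liveCubes, deadCubes
-- ===== SOURCE B (Python) =====
-- def _inter(r1, r2):
--     lo = max(r1[0], r2[0])
--     hi = min(r1[1], r2[1])
--     return (lo, hi) if lo <= hi else None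
--
-- def _sides(r, lo, hi):
--     out = []
--     if r[0] < lo:
--         out.append((r[0], lo - 1))
--     if hi < r[1]:
--         out.append((hi + 1, r[1]))
--     return out
--
-- def cubeSegments(c1, c2):
--     (x1, y1, z1) = c1
--     (x2, y2, z2) = c2
--     zi = _inter(z1, z2)
--     if zi is None:
--         return [c1], []
--     zslabs = [(x1, y1, r) for r in _sides(z1, *zi)]
--     xi = _inter(x1, x2)
--     yi = _inter(y1, y2)
--     if xi is None or yi is None:
--         return zslabs + [(x1, y1, zi)], []
--     live = zslabs \
--         + [(r, y1, zi) for r in _sides(x1, *xi)] \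
--         + [(xi, r, zi) for r in _sides(y1, *yi)]
--     return live, [(xi, yi, zi)]
-- ===== Notes on version B (the rewrite author's own statement) =====
-- stated objective: simpler
-- what changed: Replaces the nine-branch interval case-ladder plus the intermediate square-splitting stage by closed-form interval intersection (lo=max, hi=min) with up to two leftover side pieces per axis, emitting the live/dead cuboid lists directly in one flat pass.
-- intended difference: On degenerate inputs where some coordinate range of c1 or c2 is empty (inverted, lo>hi) in a way that strikes one of A's endpoint cases, A returns splits containing phantom or inverted sub-cuboids (e.g. it 'intersects' with an empty cuboid), while B treats an empty range as no intersection and returns the geometrically intended split. — e.g. on cubeSegments(((0, 0), (0, 0), (0, 0)), ((0, 0), (0, 0), (0, -1))): A returns ([((0, 0), (0, 0), (0, 0))], [((0, 0), (0, 0), (0, -1))]), B returns ([((0, 0), (0, 0), (0, 0))], [])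
import Mathlib
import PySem

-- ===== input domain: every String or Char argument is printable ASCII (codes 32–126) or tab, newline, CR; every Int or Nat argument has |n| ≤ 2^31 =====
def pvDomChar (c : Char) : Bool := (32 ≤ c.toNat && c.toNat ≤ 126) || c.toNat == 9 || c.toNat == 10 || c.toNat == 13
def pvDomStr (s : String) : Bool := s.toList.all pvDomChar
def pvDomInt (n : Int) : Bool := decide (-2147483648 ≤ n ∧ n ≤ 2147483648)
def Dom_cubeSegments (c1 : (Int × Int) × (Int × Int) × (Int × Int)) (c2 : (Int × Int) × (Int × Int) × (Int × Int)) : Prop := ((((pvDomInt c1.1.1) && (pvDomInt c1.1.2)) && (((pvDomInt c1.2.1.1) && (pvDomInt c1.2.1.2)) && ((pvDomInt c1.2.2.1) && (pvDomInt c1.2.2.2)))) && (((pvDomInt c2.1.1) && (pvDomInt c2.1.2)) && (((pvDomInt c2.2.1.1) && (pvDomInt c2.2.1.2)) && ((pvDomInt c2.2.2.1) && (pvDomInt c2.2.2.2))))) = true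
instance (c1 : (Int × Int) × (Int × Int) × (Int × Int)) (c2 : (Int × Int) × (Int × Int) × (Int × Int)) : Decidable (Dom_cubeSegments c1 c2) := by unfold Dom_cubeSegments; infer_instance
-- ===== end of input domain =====

-- B replaces A's nine-branch interval case-ladder and intermediate square stage by closed-form
-- interval intersection with per-axis side pieces, emitted in one flat pass (objective: simpler).
-- On degenerate (empty-range) corner inputs captured by D_cubeSegments, B intentionally differs from A.
-- ===== PORT A =====
def lineSegmentsA (r1 r2 : Int × Int) : List (Int × Int) × List (Int × Int) :=
  if r2.1 < r1.1 ∧ r2.2 < r1.1 then ([r1], [])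
  else if r2.1 < r1.1 ∧ r2.2 = r1.1 ∧ r1.1 < r1.2 then ([(r1.1 + 1, r1.2)], [(r1.1, r1.1)])
  else if r2.1 = r1.1 ∧ r2.2 < r1.2 then ([(r2.2 + 1, r1.2)], [(r1.1, r2.2)])
  else if r2.1 = r1.2 then
    (if r1.1 = r1.2 then ([], [r1]) else ([(r1.1, r1.2 - 1)], [(r1.2, r1.2)]))
  else if r2.1 ≤ r1.1 ∧ r1.2 ≤ r2.2 then ([], [r1])
  else if r2.1 ≤ r1.1 ∧ r1.1 < r2.2 ∧ r2.2 < r1.2 then ([(r2.2 + 1, r1.2)], [(r1.1, r2.2)])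
  else if r1.1 < r2.1 ∧ r2.2 < r1.2 then ([(r1.1, r2.1 - 1), (r2.2 + 1, r1.2)], [r2])
  else if r1.1 < r2.1 ∧ r2.1 < r1.2 ∧ r1.2 ≤ r2.2 then ([(r1.1, r2.1 - 1)], [(r2.1, r1.2)])
  else ([r1], [])

def squareSegmentsA (s1 s2 : (Int × Int) × (Int × Int)) :
    List ((Int × Int) × (Int × Int)) × List ((Int × Int) × (Int × Int)) :=
  let x1 := s1.1; let y1 := s1.2
  let x2 := s2.1; let y2 := s2.2
  let px := lineSegmentsA x1 x2
  if px.2.length = 0 then ([s1], []) else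
  let py := lineSegmentsA y1 y2
  if py.2.length = 0 then ([s1], []) else
  let liveSquares := px.1.foldl (fun acc r => acc ++ [(r, y1)]) []
  let st := px.2.foldl (fun (acc : List ((Int × Int) × (Int × Int)) × List ((Int × Int) × (Int × Int))) r =>
      let l := py.1.foldl (fun a r2 => a ++ [(r, r2)]) acc.1
      let d := py.2.foldl (fun a r2 => a ++ [(r, r2)]) acc.2
      (l, d)) (liveSquares, [])
  (st.1, st.2)

def cubeSegments (c1 : (Int × Int) × (Int × Int) × (Int × Int)) (c2 : (Int × Int) × (Int × Int) × (Int × Int)) : (List ((Int × Int) × (Int × Int) × (Int × Int))) × (List ((Int × Int) × (Int × Int) × (Int × Int))) :=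
  let x1 := c1.1; let y1 := c1.2.1; let z1 := c1.2.2
  let x2 := c2.1; let y2 := c2.2.1; let z2 := c2.2.2
  let pz := lineSegmentsA z1 z2
  if pz.2.length > 0 then
    let sq := squareSegmentsA (x1, y1) (x2, y2)
    let liveCubes := pz.1.foldl (fun acc r => acc ++ [(x1, y1, r)]) []
    let st := pz.2.foldl (fun (acc : List ((Int × Int) × (Int × Int) × (Int × Int)) × List ((Int × Int) × (Int × Int) × (Int × Int))) r =>
        let l := sq.1.foldl (fun a xy => a ++ [(xy.1, xy.2, r)]) acc.1
        let d := sq.2.foldl (fun a xy => a ++ [(xy.1, xy.2, r)]) acc.2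
        (l, d)) (liveCubes, [])
    (st.1, st.2)
  else ([c1], [])

-- ===== PORT B =====
def pvInter (r1 r2 : Int × Int) : Option (Int × Int) :=
  let lo := max r1.1 r2.1
  let hi := min r1.2 r2.2
  if lo ≤ hi then some (lo, hi) else none

def pvSides (r : Int × Int) (lo hi : Int) : List (Int × Int) :=
  (if r.1 < lo then [(r.1, lo - 1)] else []) ++ (if hi < r.2 then [(hi + 1, r.2)] else [])

def cubeSegments_alt (c1 : (Int × Int) × (Int × Int) × (Int × Int)) (c2 : (Int × Int) × (Int × Int) × (Int × Int)) : (List ((Int × Int) × (Int × Int) × (Int × Int))) × (List ((Int × Int) × (Int × Int) × (Int × Int))) :=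
  let x1 := c1.1; let y1 := c1.2.1; let z1 := c1.2.2
  let x2 := c2.1; let y2 := c2.2.1; let z2 := c2.2.2
  match pvInter z1 z2 with
  | none => ([c1], [])
  | some zi =>
    let zslabs := (pvSides z1 zi.1 zi.2).map (fun r => (x1, y1, r))
    match pvInter x1 x2, pvInter y1 y2 with
    | some xi, some yi =>
        (zslabs ++ (pvSides x1 xi.1 xi.2).map (fun r => (r, y1, zi))
               ++ (pvSides y1 yi.1 yi.2).map (fun r => (xi, r, zi)),
         [(xi, yi, zi)])
    | _, _ => (zslabs ++ [(x1, y1, zi)], [])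

-- ===== PRECONDITION & SPEC =====
-- Interval-overlap test used by the change region: the two ranges intersect.
def pvOV (r1 r2 : Int × Int) : Prop := max r1.1 r2.1 ≤ min r1.2 r2.2

-- A's "wholly covered" branch misfiring on an empty r1 (it returns ([], [r1])).
def pvM5 (r1 r2 : Int × Int) : Prop :=
  r1.2 < r1.1 ∧ r2.1 ≤ r1.1 ∧ r1.2 ≤ r2.2 ∧ r2.1 ≠ r1.2 ∧ (r1.1 ≤ r2.2 ∨ r1.1 = r2.1)

-- Endpoint configurations (always involving an empty, i.e. inverted, range) on which
-- A's line ladder disagrees with the closed-form intersection split.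
def pvLM (r1 r2 : Int × Int) : Prop :=
  (r1.1 ≤ r2.1 ∧ r2.2 < r2.1 ∧ r2.2 < r1.2) ∨
  (r1.2 < r1.1 ∧ r2.1 ≤ r1.1 ∧ r1.2 ≤ r2.2 ∧ (r1.1 ≤ r2.2 ∨ r1.1 = r2.1))

-- "A's dead segment list for this axis is nonempty."
def pvDead (r1 r2 : Int × Int) : Prop := pvLM r1 r2 ∨ pvOV r1 r2

-- On inputs with an empty (inverted) coordinate range that strikes one of A's endpoint cases, A
-- returns splits containing phantom or inverted sub-cuboids; B treats an empty range as no
-- intersection and returns the geometrically intended split, which is what a maintainer would want.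
def D_cubeSegments (c1 : (Int × Int) × (Int × Int) × (Int × Int)) (c2 : (Int × Int) × (Int × Int) × (Int × Int)) : Prop :=
  (pvLM c1.2.2 c2.2.2 ∧ (¬ pvM5 c1.2.2 c2.2.2 ∨ (pvDead c1.1 c2.1 ∧ pvDead c1.2.1 c2.2.1))) ∨
  (pvOV c1.2.2 c2.2.2 ∧
     ((pvLM c1.1 c2.1 ∧ pvDead c1.2.1 c2.2.1) ∨ (pvLM c1.2.1 c2.2.1 ∧ pvDead c1.1 c2.1)))
instance (c1 : (Int × Int) × (Int × Int) × (Int × Int)) (c2 : (Int × Int) × (Int × Int) × (Int × Int)) : Decidable (D_cubeSegments c1 c2) := by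
  letI I1 : ∀ r1 r2 : Int × Int, Decidable (pvOV r1 r2) := fun r1 r2 => by unfold pvOV; infer_instance
  letI I2 : ∀ r1 r2 : Int × Int, Decidable (pvLM r1 r2) := fun r1 r2 => by unfold pvLM; infer_instance
  letI I3 : ∀ r1 r2 : Int × Int, Decidable (pvM5 r1 r2) := fun r1 r2 => by unfold pvM5; infer_instance
  letI I4 : ∀ r1 r2 : Int × Int, Decidable (pvDead r1 r2) := fun r1 r2 => by unfold pvDead; infer_instance
  unfold D_cubeSegments; infer_instance

def Spec_cubeSegments (c1 : (Int × Int) × (Int × Int) × (Int × Int)) (c2 : (Int × Int) × (Int × Int) × (Int × Int)) (out : (List ((Int × Int) × (Int × Int) × (Int × Int))) × (List ((Int × Int) × (Int × Int) × (Int × Int)))) : Prop := ¬ D_cubeSegments c1 c2 → out = cubeSegments_alt c1 c2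
instance (c1 : (Int × Int) × (Int × Int) × (Int × Int)) (c2 : (Int × Int) × (Int × Int) × (Int × Int)) (out : (List ((Int × Int) × (Int × Int) × (Int × Int))) × (List ((Int × Int) × (Int × Int) × (Int × Int)))) : Decidable (Spec_cubeSegments c1 c2 out) := by unfold Spec_cubeSegments; infer_instance

def pvDiffWitness_cubeSegments : ((Int × Int) × (Int × Int) × (Int × Int)) × ((Int × Int) × (Int × Int) × (Int × Int)) :=
  (((0, 0), (0, 0), (0, 0)), ((0, 0), (0, 0), (0, -1)))
def pvDiffWitnessOut_cubeSegments : ((List ((Int × Int) × (Int × Int) × (Int × Int))) × (List ((Int × Int) × (Int × Int) × (Int × Int)))) × ((List ((Int × Int) × (Int × Int) × (Int × Int))) × (List ((Int × Int) × (Int × Int) × (Int × Int)))) :=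
  (([((0, 0), (0, 0), (0, 0))], [((0, 0), (0, 0), (0, -1))]),
   ([((0, 0), (0, 0), (0, 0))], []))

-- ===== CLAIM (what is proved, stated in full; the proofs are below) =====
def Claim_unchanged_cubeSegments : Prop := ∀ (c1 : (Int × Int) × (Int × Int) × (Int × Int)) (c2 : (Int × Int) × (Int × Int) × (Int × Int)), Dom_cubeSegments c1 c2 → Spec_cubeSegments c1 c2 (cubeSegments c1 c2)
def Claim_changed_cubeSegments : Prop := Dom_cubeSegments (pvDiffWitness_cubeSegments.1) (pvDiffWitness_cubeSegments.2) ∧ D_cubeSegments (pvDiffWitness_cubeSegments.1) (pvDiffWitness_cubeSegments.2) ∧ cubeSegments (pvDiffWitness_cubeSegments.1) (pvDiffWitness_cubeSegments.2) = pvDiffWitnessOut_cubeSegments.1 ∧ cubeSegments_alt (pvDiffWitness_cubeSegments.1) (pvDiffWitness_cubeSegments.2) = pvDiffWitnessOut_cubeSegments.2 ∧ pvDiffWitnessOut_cubeSegments.1 ≠ pvDiffWitnessOut_cubeSegments.2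

-- ===== LEMMAS AND PROOFS =====
-- closed-form value of A's line split wherever the ladder is not misfiring
def lineClosed (r1 r2 : Int × Int) : List (Int × Int) × List (Int × Int) :=
  if max r1.1 r2.1 ≤ min r1.2 r2.2 then
    ((if r1.1 < max r1.1 r2.1 then [(r1.1, max r1.1 r2.1 - 1)] else []) ++
       (if min r1.2 r2.2 < r1.2 then [(min r1.2 r2.2 + 1, r1.2)] else []),
     [(max r1.1 r2.1, min r1.2 r2.2)])
  else ([r1], [])

set_option maxHeartbeats 2000000 in
lemma line_agree (a b c d : Int) (h : ¬ pvLM (a, b) (c, d)) :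
    lineSegmentsA (a, b) (c, d) = lineClosed (a, b) (c, d) := by
  simp only [pvLM] at h
  simp only [lineSegmentsA, lineClosed, max_def, min_def]
  split_ifs <;> (first
    | rfl
    | (exfalso; omega)
    | (simp only [List.nil_append, List.append_nil, List.cons_append, Prod.mk.injEq,
        List.cons.injEq, and_true, true_and]; omega))

lemma line_M5 (a b c d : Int) (h : pvM5 (a, b) (c, d)) :
    lineSegmentsA (a, b) (c, d) = ([], [(a, b)]) := by
  simp only [pvM5] at h
  simp only [lineSegmentsA]
  split_ifs <;> first | rfl | (exfalso; omega)

set_option maxHeartbeats 1000000 in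
lemma line_dead_nil (a b c d : Int) (h : ¬ pvDead (a, b) (c, d)) :
    (lineSegmentsA (a, b) (c, d)).2 = [] := by
  simp only [pvDead, pvLM, pvOV] at h
  simp only [lineSegmentsA]
  split_ifs <;> first | rfl | (exfalso; omega)

lemma square_x (s1 s2 : (Int × Int) × (Int × Int))
    (hx : (lineSegmentsA s1.1 s2.1).2 = []) : squareSegmentsA s1 s2 = ([s1], []) := by
  simp [squareSegmentsA, hx]

lemma square_y (s1 s2 : (Int × Int) × (Int × Int))
    (hy : (lineSegmentsA s1.2 s2.2).2 = []) : squareSegmentsA s1 s2 = ([s1], []) := by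
  simp only [squareSegmentsA]
  split_ifs <;> simp_all

-- appending singletons in a left fold is mapping
lemma foldl_app {α β : Type} (g : α → β) (l : List α) (acc : List β) :
    List.foldl (fun acc r => acc ++ [g r]) acc l = acc ++ l.map g := by
  induction l generalizing acc with
  | nil => simp
  | cons x xs ih => simp [ih]

-- ===== VERDICT (by name: the statement is the Claim_ definition above) =====
set_option maxHeartbeats 2000000 in
theorem cubeSegments_spec : Claim_unchanged_cubeSegments := by
  intro c1 c2 _
  unfold Spec_cubeSegments
  intro hnd
  obtain ⟨⟨a1, b1⟩, ⟨a2, b2⟩, ⟨a3, b3⟩⟩ := c1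
  obtain ⟨⟨c1', d1⟩, ⟨c2', d2⟩, ⟨c3', d3⟩⟩ := c2
  unfold D_cubeSegments at hnd
  rw [not_or] at hnd
  obtain ⟨hn1, hn2⟩ := hnd
  dsimp only at hn1 hn2
  show cubeSegments _ _ = cubeSegments_alt _ _
  dsimp only [cubeSegments, cubeSegments_alt, pvInter, pvSides]
  by_cases hLz : pvLM (a3, b3) (c3', d3)
  · have h53 : pvM5 (a3, b3) (c3', d3) ∧
        ¬(pvDead (a1, b1) (c1', d1) ∧ pvDead (a2, b2) (c2', d2)) := by tauto
    obtain ⟨h5, hnxy⟩ := h53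
    rw [line_M5 _ _ _ _ h5]
    have hoz' : ¬ (max a3 c3' ≤ min b3 d3) := by
      simp only [pvM5] at h5; omega
    rcases not_and_or.mp hnxy with hnx | hny
    · rw [square_x ((a1, b1), (a2, b2)) ((c1', d1), (c2', d2)) (line_dead_nil _ _ _ _ hnx)]
      simp [hoz', foldl_app]
    · rw [square_y ((a1, b1), (a2, b2)) ((c1', d1), (c2', d2)) (line_dead_nil _ _ _ _ hny)]
      simp [hoz', foldl_app]
  · rw [line_agree _ _ _ _ hLz]
    dsimp only [lineClosed]
    by_cases hOz : max a3 c3' ≤ min b3 d3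
    · have hOVz : pvOV (a3, b3) (c3', d3) := by simpa [pvOV] using hOz
      by_cases hDx : pvDead (a1, b1) (c1', d1)
      · by_cases hDy : pvDead (a2, b2) (c2', d2)
        · have hLxy : ¬ pvLM (a1, b1) (c1', d1) ∧ ¬ pvLM (a2, b2) (c2', d2) := by tauto
          obtain ⟨hLx, hLy⟩ := hLxy
          have hOx : pvOV (a1, b1) (c1', d1) := by
            have := hDx; simp only [pvDead] at this; tauto
          have hOy : pvOV (a2, b2) (c2', d2) := by
            have := hDy; simp only [pvDead] at this; tauto
          have hOx' : max a1 c1' ≤ min b1 d1 := by simpa [pvOV] using hOx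
          have hOy' : max a2 c2' ≤ min b2 d2 := by simpa [pvOV] using hOy
          simp only [squareSegmentsA]
          rw [line_agree _ _ _ _ hLx, line_agree _ _ _ _ hLy]
          dsimp only [lineClosed]
          simp [hOz, hOx', hOy', foldl_app, List.map_append, List.map_map, Function.comp]
          split_ifs <;> simp
        · have h : ¬ (max a2 c2' ≤ min b2 d2) := by
            have := hDy; simp only [pvDead, pvOV] at this; omega
          rw [square_y ((a1, b1), (a2, b2)) ((c1', d1), (c2', d2)) (line_dead_nil _ _ _ _ hDy)]
          simp [hOz, h, foldl_app] <;> split_ifs <;> simp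
      · have h : ¬ (max a1 c1' ≤ min b1 d1) := by
          have := hDx; simp only [pvDead, pvOV] at this; omega
        rw [square_x ((a1, b1), (a2, b2)) ((c1', d1), (c2', d2)) (line_dead_nil _ _ _ _ hDx)]
        simp [hOz, h, foldl_app] <;> split_ifs <;> simp
    · simp [hOz]

theorem cubeSegments_changed : Claim_changed_cubeSegments := by
  unfold Claim_changed_cubeSegments
  exact ⟨by decide, by decide, by decide, by decide, by decide⟩
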